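-- pv_equiv track=rewrite | github.com/AustinGallegos/Koality-Rotator | managers/assignment_manager.py | assign_roles_to_associates
-- ===== SOURCE A (Python) =====
-- def assign_roles_to_associates(key, nums_roles, trained_associates, scheduled_associates, chosen_associates):
--     """Assign available trained associates to specific roles."""
--     result = ""
--     not_enough = ""
--     empty = False
--     for _ in range(nums_roles):
--         while True:
--             try:
--                 choice = trained_associates.pop()
--             except IndexError:
--                 not_enough += f"Not enough eligible AAs to fill {key}.\n"
--                 empty = True
--                 break
--
--             else:
--                 if choice not in scheduled_associates:
--                     continue
--
--                 if choice not in chosen_associates: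
--                     chosen_associates.add(choice)
--                     result += f"{key}: {choice}\n"
--                     break
--
--         if empty:
--             break
--
--     return result, not_enough
-- ===== SOURCE B (Python) =====
-- def assign_roles_to_associates(key, nums_roles, trained_associates, scheduled_associates, chosen_associates):
--     """Assign available trained associates to specific roles.
--
--     Two staged passes instead of A's demand-driven pop simulation: first
--     compute, in one declarative scan over reversed(trained_associates), the
--     full greedy sequence of eligible candidates (scheduled and not yet
--     chosen, with duplicates suppressed); then slice the first nums_roles of
--     them into the result and decide the single 'Not enough' line by a length
--     comparison.  Equivalence is about the return value: B does not mutate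
--     trained_associates or chosen_associates.
--     """
--     sched = set(scheduled_associates)
--     taken = set(chosen_associates)
--     picks = []
--     for cand in reversed(trained_associates):
--         if cand in sched and cand not in taken:
--             taken.add(cand)
--             picks.append(cand)
--     n = max(nums_roles, 0)
--     result = "".join(f"{key}: {c}\n" for c in picks[:n])
--     not_enough = "" if len(picks) >= n else f"Not enough eligible AAs to fill {key}.\n"
--     return result, not_enough
-- ===== Notes on version B (the rewrite author's own statement) =====
-- stated objective: alternative
-- what changed: Replaces A's demand-driven simulation (outer for over roles, inner while popping candidates with try/except and an empty flag, mutating the inputs) by two staged passes: one declarative scan computes the full greedy sequence of eligible candidates, then the result is the join over a slice of it and the 'Not enough' line is a length comparison; B does not mutate its arguments (return-value equivalence).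
import Mathlib
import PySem

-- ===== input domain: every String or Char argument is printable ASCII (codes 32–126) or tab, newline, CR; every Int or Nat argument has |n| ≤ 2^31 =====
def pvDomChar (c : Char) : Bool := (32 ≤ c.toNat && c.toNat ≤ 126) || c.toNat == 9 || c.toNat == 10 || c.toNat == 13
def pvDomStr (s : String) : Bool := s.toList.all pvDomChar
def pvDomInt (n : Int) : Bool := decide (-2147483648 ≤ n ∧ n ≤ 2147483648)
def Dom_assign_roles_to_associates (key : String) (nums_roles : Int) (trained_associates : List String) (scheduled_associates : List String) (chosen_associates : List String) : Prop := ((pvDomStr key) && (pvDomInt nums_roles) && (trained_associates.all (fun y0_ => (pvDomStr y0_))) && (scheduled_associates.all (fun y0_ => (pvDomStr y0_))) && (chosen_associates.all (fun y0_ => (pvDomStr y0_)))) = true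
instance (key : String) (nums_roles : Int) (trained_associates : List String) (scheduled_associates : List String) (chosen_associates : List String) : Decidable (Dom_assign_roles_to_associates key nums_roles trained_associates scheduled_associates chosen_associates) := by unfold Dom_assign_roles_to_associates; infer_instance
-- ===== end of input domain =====

-- B replaces A's demand-driven pop simulation by two staged passes: one scan computing the full
-- greedy eligible sequence, then a slice/join and a length comparison (objective: alternative).
-- A mutates trained_associates and chosen_associates, B does not; equivalence is about the return value.

-- ===== PORT A =====
-- Python's trained_associates.pop() removes the LAST element; the port therefore works on the
-- reversed list, where pop() is taking the head (exact encoding of the pop order).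
-- A's inner `while True`: pop until a candidate in scheduled and not in chosen is found
-- (success: the candidate, the remaining stack, the grown chosen set) or the stack is empty (IndexError).
def assignInnerA (sched : List String) : List String → PySem.Set String → Option (String × List String × PySem.Set String)
  | [], _chosen => none
  | c :: rest, chosen =>
      if ¬ sched.contains c then assignInnerA sched rest chosen
      else if ¬ chosen.contains c then some (c, rest, PySem.Set.add chosen c)
      else assignInnerA sched rest chosen

-- A's outer `for _ in range(nums_roles)` with the `empty`-flag early break; `result += f"…"`.
def assignOuterA (key : String) (sched : List String) : Nat → List String → PySem.Set String → String → String × String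
  | 0, _, _, acc => (acc, "")
  | n + 1, stack, chosen, acc =>
      match assignInnerA sched stack chosen with
      | none => (acc, "Not enough eligible AAs to fill " ++ key ++ ".\n")
      | some (c, rest, chosen') =>
          assignOuterA key sched n rest chosen' (acc ++ (key ++ ": " ++ c ++ "\n"))

def assign_roles_to_associates (key : String) (nums_roles : Int) (trained_associates : List String) (scheduled_associates : List String) (chosen_associates : List String) : String × String :=
  assignOuterA key scheduled_associates nums_roles.toNat trained_associates.reverse chosen_associates ""

-- ===== PORT B =====
-- B's single `for cand in reversed(trained_associates)` pass: collect (picks.append) every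
-- candidate in sched and not in the growing taken set.
def pickLoopB (sched : PySem.Set String) : List String → PySem.Set String → List String → List String
  | [], _, acc => acc
  | c :: rest, taken, acc =>
      if sched.contains c && !taken.contains c then
        pickLoopB sched rest (PySem.Set.add taken c) (acc ++ [c])
      else pickLoopB sched rest taken acc

-- picks[:n] sliced and joined; the 'Not enough' line from the final length comparison.
def assign_roles_to_associates_alt (key : String) (nums_roles : Int) (trained_associates : List String) (scheduled_associates : List String) (chosen_associates : List String) : String × String :=
  let picks := pickLoopB (PySem.Set.ofList scheduled_associates) trained_associates.reverse (PySem.Set.ofList chosen_associates) []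
  let n := (max nums_roles 0).toNat
  (PySem.Str.join "" ((picks.take n).map (fun c => key ++ ": " ++ c ++ "\n")),
   if n ≤ picks.length then "" else "Not enough eligible AAs to fill " ++ key ++ ".\n")

-- ===== PRECONDITION & SPEC =====
def Spec_assign_roles_to_associates (key : String) (nums_roles : Int) (trained_associates : List String) (scheduled_associates : List String) (chosen_associates : List String) (out : String × String) : Prop := out = assign_roles_to_associates_alt key nums_roles trained_associates scheduled_associates chosen_associates
instance (key : String) (nums_roles : Int) (trained_associates : List String) (scheduled_associates : List String) (chosen_associates : List String) (out : String × String) : Decidable (Spec_assign_roles_to_associates key nums_roles trained_associates scheduled_associates chosen_associates out) := by unfold Spec_assign_roles_to_associates; infer_instance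

-- ===== CLAIM (what is proved, stated in full; the proofs are below) =====
def Claim_equal_assign_roles_to_associates : Prop := ∀ (key : String) (nums_roles : Int) (trained_associates : List String) (scheduled_associates : List String) (chosen_associates : List String), Dom_assign_roles_to_associates key nums_roles trained_associates scheduled_associates chosen_associates → Spec_assign_roles_to_associates key nums_roles trained_associates scheduled_associates chosen_associates (assign_roles_to_associates key nums_roles trained_associates scheduled_associates chosen_associates)

-- ===== LEMMAS AND PROOFS =====

-- Pure (non-accumulator) form of the greedy eligible sequence, the proofs' reference object.
def eligSeq (sched : List String) : List String → PySem.Set String → List String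
  | [], _ => []
  | c :: rest, taken =>
      if sched.contains c && !taken.contains c then
        c :: eligSeq sched rest (PySem.Set.add taken c)
      else eligSeq sched rest taken

theorem contains_ofList (l : List String) (x : String) :
    (PySem.Set.ofList l).contains x = l.contains x := by
  simp [PySem.Set.mem_ofList]

-- B's accumulator loop equals acc ++ the pure greedy sequence (with set(scheduled) membership
-- replaced by list membership).
theorem pickLoopB_eq_eligSeq (schedL : List String) :
    ∀ (stack : List String) (taken : PySem.Set String) (acc : List String),
      pickLoopB (PySem.Set.ofList schedL) stack taken acc = acc ++ eligSeq schedL stack taken := by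
  intro stack
  induction stack with
  | nil => intro taken acc; simp [pickLoopB, eligSeq]
  | cons c rest ih =>
      intro taken acc
      simp only [pickLoopB, eligSeq, contains_ofList]
      by_cases h : (schedL.contains c && !taken.contains c) = true
      · rw [if_pos h, if_pos h, ih]; simp
      · rw [if_neg h, if_neg h, ih]

-- eligSeq only depends on the taken set through membership.
theorem eligSeq_congr (schedL : List String) :
    ∀ (stack : List String) (t1 t2 : PySem.Set String),
      (∀ x, t1.contains x = t2.contains x) → eligSeq schedL stack t1 = eligSeq schedL stack t2 := by
  intro stack
  induction stack with
  | nil => intro t1 t2 _; rfl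
  | cons c rest ih =>
      intro t1 t2 h
      have hm : ∀ y, y ∈ t1 ↔ y ∈ t2 := by
        intro y; rw [← PySem.Set.contains_iff, ← PySem.Set.contains_iff, h y]
      have hadd : ∀ y, (PySem.Set.add t1 c).contains y = (PySem.Set.add t2 c).contains y := by
        intro y
        rw [Bool.eq_iff_iff]
        simp only [PySem.Set.contains_iff, PySem.Set.mem_add, hm y]
      simp only [eligSeq, h c]
      by_cases hc : (schedL.contains c && !t2.contains c) = true
      · rw [if_pos hc, if_pos hc, ih _ _ hadd]
      · rw [if_neg hc, if_neg hc, ih _ _ h]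

-- "".join over List Char lists is concatenation.
theorem join_empty_flatten (xs : List (List Char)) : PySem.Chars.join [] xs = xs.flatten := by
  match xs with
  | [] => simp [PySem.Chars.join_nil]
  | [p] => simp [PySem.Chars.join_singleton]
  | p :: q :: rest => rw [PySem.Chars.join_cons_cons, join_empty_flatten (q :: rest)]; simp

theorem join_empty_cons (s : String) (l : List String) :
    PySem.Str.join "" (s :: l) = s ++ PySem.Str.join "" l := by
  simp [PySem.Str.join, join_empty_flatten, String.ofList_append, String.ofList_toList]

-- Core invariant: A's nested loops compute the join over the first-n slice of the greedy
-- eligible sequence, and emit the 'Not enough' line exactly when that sequence is shorter than n.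
theorem assignOuterA_eq (key : String) (schedL : List String) :
    ∀ (stack : List String) (n : Nat) (chosen : PySem.Set String) (acc : String),
      assignOuterA key schedL n stack chosen acc =
        (acc ++ PySem.Str.join "" (((eligSeq schedL stack chosen).take n).map (fun c => key ++ ": " ++ c ++ "\n")),
         if n ≤ (eligSeq schedL stack chosen).length then "" else "Not enough eligible AAs to fill " ++ key ++ ".\n") := by
  intro stack
  induction stack with
  | nil =>
      intro n chosen acc
      cases n with
      | zero => simp [assignOuterA, eligSeq, PySem.Str.join]
      | succ m => simp [assignOuterA, assignInnerA, eligSeq, PySem.Str.join]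
  | cons c rest ih =>
      intro n chosen acc
      cases n with
      | zero => simp [assignOuterA, PySem.Str.join]
      | succ m =>
          by_cases hs : schedL.contains c
          · by_cases hc : chosen.contains c
            · -- in scheduled but already chosen: skipped by both
              simp only [assignOuterA, assignInnerA, hs, hc, not_true, if_false, eligSeq, Bool.and_eq_true, Bool.not_eq_true']
              have h := ih (m + 1) chosen acc
              simp only [assignOuterA] at h
              simp [h]
            · -- taken
              simp only [assignOuterA, assignInnerA, hs, hc, eligSeq, not_true,
                Bool.false_eq_true, not_false_eq_true, Bool.not_false, Bool.and_self,
                if_true, if_false]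
              rw [ih]
              simp [join_empty_cons, String.append_assoc, List.take_succ_cons]
          · -- not scheduled: skipped by both
            simp only [assignOuterA, assignInnerA, hs, eligSeq]
            have h := ih (m + 1) chosen acc
            simp only [assignOuterA] at h
            simp [h]

theorem toNat_max (n : Int) : (max n 0).toNat = n.toNat := by omega

-- ===== VERDICT (by name: the statement is the Claim_ definition above) =====
theorem assign_roles_to_associates_spec : Claim_equal_assign_roles_to_associates := by
  intro key nums_roles tr sched chosen _
  unfold Spec_assign_roles_to_associates assign_roles_to_associates assign_roles_to_associates_alt
  rw [toNat_max, pickLoopB_eq_eligSeq, List.nil_append,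
    eligSeq_congr sched tr.reverse (PySem.Set.ofList chosen) chosen (fun x => contains_ofList chosen x),
    assignOuterA_eq]
  simp
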